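-- pv_equiv track=rewrite | github.com/yuzhecd/al_py | Recursion/min_array.py | find_recursion
-- ===== SOURCE A (Python) =====
-- def find_recursion(b, a):
--     if b == a:
--         return str(a)
--     if b % 2 == 1:
--         mid = find_recursion(b-1, a)
--         return '(' + mid + ' + 1)'
--     if b > 2*a:
--         mid = find_recursion(b // 2, a)
--         return  mid + ' * 2'
--     mid = find_recursion(b-1, a)
--     return '(' + mid + ' + 1)'
-- ===== SOURCE B (Python) =====
-- def find_recursion(b, a):
--     ops = []
--     while b != a:
--         if b % 2 == 1 or b <= 2 * a:
--             ops.append('+')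
--             b -= 1
--         else:
--             ops.append('*')
--             b //= 2
--     s = str(a)
--     for op in reversed(ops):
--         if op == '+':
--             s = '(' + s + ' + 1)'
--         else:
--             s = s + ' * 2'
--     return s
-- ===== Notes on version B (the rewrite author's own statement) =====
-- stated objective: alternative
-- what changed: Replaces A's recursive unwinding (string built as the recursion returns) with an explicit iterative simulation that records the operations in a list and then reconstructs the string in a second pass by folding over the recorded operations in reverse.
-- outside the precondition, e.g. on find_recursion(-1, -2): A returns '(-2 + 1)', B returns '(-2 + 1)'
import Mathlib
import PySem

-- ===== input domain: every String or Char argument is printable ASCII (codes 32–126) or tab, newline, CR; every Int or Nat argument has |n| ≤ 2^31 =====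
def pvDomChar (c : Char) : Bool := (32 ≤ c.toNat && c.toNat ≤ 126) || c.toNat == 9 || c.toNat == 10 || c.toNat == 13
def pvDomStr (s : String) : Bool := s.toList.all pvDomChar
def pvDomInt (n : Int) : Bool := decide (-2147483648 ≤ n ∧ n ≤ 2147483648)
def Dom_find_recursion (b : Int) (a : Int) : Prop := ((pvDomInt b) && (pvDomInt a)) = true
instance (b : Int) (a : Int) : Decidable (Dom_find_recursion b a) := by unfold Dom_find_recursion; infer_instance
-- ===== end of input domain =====

-- B replaces A's recursive string-unwinding by an explicit op-stack simulation plus a reverse replay pass (alternative decomposition, same result).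


-- ===== PORT A =====
-- Literal transliteration of A's recursion; the fuel argument only makes it total
-- (inside Pre_ the descent takes at most (b-a).toNat steps, so fuel never runs out there).
def findRecA : Nat → Int → Int → String
  | 0, _, a => PySem.Int.toStr a
  | f+1, b, a =>
    if b = a then PySem.Int.toStr a
    else if PySem.Int.mod b 2 = 1 then "(" ++ findRecA f (b-1) a ++ " + 1)"
    else if b > 2*a then findRecA f (PySem.Int.floordiv b 2) a ++ " * 2"
    else "(" ++ findRecA f (b-1) a ++ " + 1)"

def find_recursion (b : Int) (a : Int) : String := findRecA (b - a).toNat b a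

-- ===== PORT B =====
-- B's while-loop recording ops (true = '+1', false = '*2'); same fuel device for totality.
def collectOps : Nat → Int → Int → List Bool
  | 0, _, _ => []
  | f+1, b, a =>
    if b = a then []
    else if PySem.Int.mod b 2 = 1 ∨ b ≤ 2*a then true :: collectOps f (b-1) a
    else false :: collectOps f (PySem.Int.floordiv b 2) a

-- B's replay step: wrap for '+1', append for '*2'.
def applyOp (s : String) (op : Bool) : String :=
  if op then "(" ++ s ++ " + 1)" else s ++ " * 2"

def find_recursion_alt (b : Int) (a : Int) : String :=
  ((collectOps (b - a).toNat b a).reverse).foldl applyOp (PySem.Int.toStr a)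

-- ===== PRECONDITION & SPEC =====
-- Pre_ excludes b < a and negative a with b ≠ a, where the Python A generally hits
-- RecursionError (an unbounded descent, or the -1/-2 parity cycle for negative a);
-- on the few negative inputs whose odd-decrement chain happens to reach a, A returns
-- and B agrees, so Pre_ is slightly narrower than its reason there.
def Pre_find_recursion (b : Int) (a : Int) : Prop := a ≤ b ∧ (0 ≤ a ∨ b = a)
instance (b : Int) (a : Int) : Decidable (Pre_find_recursion b a) := by unfold Pre_find_recursion; infer_instance
def pvWitness_find_recursion : Int × Int := (6, 1)

def Spec_find_recursion (b : Int) (a : Int) (out : String) : Prop := out = find_recursion_alt b a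
instance (b : Int) (a : Int) (out : String) : Decidable (Spec_find_recursion b a out) := by unfold Spec_find_recursion; infer_instance

-- ===== CLAIM (what is proved, stated in full; the proofs are below) =====
def Claim_equal_find_recursion : Prop := ∀ (b : Int) (a : Int), Dom_find_recursion b a → Pre_find_recursion b a → Spec_find_recursion b a (find_recursion b a)

-- ===== LEMMAS AND PROOFS =====

-- The recursive unwinding equals the right fold of the recorded ops, for every fuel.
theorem findRecA_eq_foldr (f : Nat) : ∀ (b a : Int),
    findRecA f b a = (collectOps f b a).foldr (fun op s => applyOp s op) (PySem.Int.toStr a) := by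
  induction f with
  | zero => intro b a; rfl
  | succ f ih =>
    intro b a
    by_cases hba : b = a
    · simp only [findRecA, collectOps, if_pos hba, List.foldr_nil]
    · by_cases hodd : PySem.Int.mod b 2 = 1
      · simp only [findRecA, collectOps, if_neg hba, if_pos hodd,
          if_pos (Or.inl hodd : PySem.Int.mod b 2 = 1 ∨ b ≤ 2*a), List.foldr_cons, ih, applyOp]
        simp
      · by_cases hgt : b > 2*a
        · have hor : ¬ (PySem.Int.mod b 2 = 1 ∨ b ≤ 2*a) := by
            rintro (h | h)
            · exact hodd h
            · exact absurd hgt (not_lt.mpr h)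
          simp only [findRecA, collectOps, if_neg hba, if_neg hodd, if_pos hgt, if_neg hor,
            List.foldr_cons, ih, applyOp, Bool.false_eq_true]
          simp
        · have hor : PySem.Int.mod b 2 = 1 ∨ b ≤ 2*a := Or.inr (not_lt.mp hgt)
          simp only [findRecA, collectOps, if_neg hba, if_neg hodd, if_neg hgt, if_pos hor,
            List.foldr_cons, ih, applyOp]
          simp

-- ===== VERDICT (by name: the statement is the Claim_ definition above) =====
theorem find_recursion_spec : Claim_equal_find_recursion := by
  intro b a _ _
  unfold Spec_find_recursion find_recursion find_recursion_alt
  rw [List.foldl_reverse]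
  exact findRecA_eq_foldr _ b a
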